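-- pv_equiv track=rewrite | github.com/zeunny/APS | programmers/42891.py | solution
-- ===== SOURCE A (Python) =====
-- def solution(food_times, k):
--     length_ft = len(food_times)
--     sort_ft = [0] + sorted(food_times)
--     for i in range(1,len(food_times)+1):
--         remove_time = (sort_ft[i]-sort_ft[i-1])*length_ft
--         if k - remove_time < 0:
--             break
--         k -= remove_time
--         length_ft -= 1
--     else:
--         return -1
--
--     value = sort_ft[i]
--     cnt = k % (len(food_times)-i+1)
--     for i, food_time in enumerate(food_times):
--         if food_time >= value:
--             if cnt == 0:
--                 return i+1
--             cnt -= 1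
-- ===== SOURCE B (Python) =====
-- def solution(food_times, k):
--     n = len(food_times)
--     s = sorted(food_times)
--     pref = [0]
--     acc = 0
--     for t in s:
--         acc += t
--         pref.append(acc)
--
--     def consumed(i):
--         # total seconds spent when every dish has been eaten down by the i-th
--         # smallest time (0 for i == 0): full levels below s[i-1] plus the last level
--         if i == 0:
--             return 0
--         return pref[i - 1] + s[i - 1] * (n - i + 1)
--
--     # binary search for the first level index i (1..n) whose completion exceeds k
--     lo, hi = 1, n + 1
--     while lo < hi:
--         mid = (lo + hi) // 2
--         if k < consumed(mid):
--             hi = mid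
--         else:
--             lo = mid + 1
--     if lo == n + 1:
--         return -1
--     value = s[lo - 1]
--     cnt = (k - consumed(lo - 1)) % (n - lo + 1)
--     survivors = [i for i, t in enumerate(food_times, 1) if t >= value]
--     return survivors[cnt]
-- ===== Notes on version B (the rewrite author's own statement) =====
-- stated objective: alternative
-- what changed: B replaces A's linear one-level-at-a-time subtraction loop by prefix sums over the sorted times plus a hand-written binary search for the first level whose cumulative consumption exceeds k, and replaces A's countdown re-scan by directly indexing the list of surviving 1-based indices.
import Mathlib
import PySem

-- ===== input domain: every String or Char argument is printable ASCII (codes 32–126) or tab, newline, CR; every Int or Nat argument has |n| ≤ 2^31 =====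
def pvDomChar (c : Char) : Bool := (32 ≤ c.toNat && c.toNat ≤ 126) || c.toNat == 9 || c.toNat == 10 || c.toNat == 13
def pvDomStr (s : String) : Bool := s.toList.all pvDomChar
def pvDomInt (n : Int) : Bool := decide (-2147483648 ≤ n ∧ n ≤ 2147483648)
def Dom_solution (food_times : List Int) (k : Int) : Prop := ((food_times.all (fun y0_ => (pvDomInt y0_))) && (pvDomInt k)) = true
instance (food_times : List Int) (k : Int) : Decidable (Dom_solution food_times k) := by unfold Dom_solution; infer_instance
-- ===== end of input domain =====

-- B replaces A's linear subtract-one-level-at-a-time loop by prefix sums of the sorted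
-- times plus a BINARY SEARCH for the first level whose total consumption exceeds k, and
-- replaces A's countdown re-scan by directly indexing the list of surviving 1-based
-- indices ('alternative'; same O(n log n) total because both sort).

-- ===== PORT A =====
-- first loop of A: iterates over the index list, state (k, length_ft); some (i, k) on break, none on fall-through
def aLoop (sortft : List Int) : List Int → Int → Int → Option (Int × Int)
  | [], _, _ => none
  | i :: rest, k, len =>
    let remove := (PySem.List.pyGetD sortft i 0 - PySem.List.pyGetD sortft (i - 1) 0) * len
    if k - remove < 0 then some (i, k)
    else aLoop sortft rest (k - remove) (len - 1)

-- second loop of A; the fall-through value 0 mirrors Python's implicit None, which is unreachable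
def aScan (value : Int) : List (Int × Int) → Int → Int
  | [], _ => 0
  | (i, t) :: rest, cnt =>
    if value ≤ t then (if cnt = 0 then i + 1 else aScan value rest (cnt - 1))
    else aScan value rest cnt

def solution (food_times : List Int) (k : Int) : Int :=
  let n : Int := food_times.length
  let sortft : List Int := 0 :: PySem.List.sorted food_times (fun x => x) false
  match aLoop sortft (PySem.List.pyRange 1 (n + 1) 1) k n with
  | none => -1
  | some (i, k') =>
    let value := PySem.List.pyGetD sortft i 0
    let cnt := PySem.Int.mod k' (n - i + 1)
    aScan value (PySem.List.enumerate food_times 0) cnt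

-- ===== PORT B =====
-- "pref = [0]; acc = 0; for t in s: acc += t; pref.append(acc)"
def bPrefLoop : List Int → List Int → Int → List Int
  | [], pref, _ => pref
  | t :: rest, pref, acc => bPrefLoop rest (pref ++ [acc + t]) (acc + t)

-- the helper 'consumed(i)' of Source B
def bConsumed (pref s : List Int) (n : Int) (i : Int) : Int :=
  if i = 0 then 0
  else PySem.List.pyGetD pref (i - 1) 0 + PySem.List.pyGetD s (i - 1) 0 * (n - i + 1)

-- "while lo < hi: mid = (lo+hi)//2; if k < consumed(mid): hi = mid else: lo = mid+1"
def bSearch (pref s : List Int) (n k : Int) (lo hi : Int) : Int :=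
  if h : lo < hi then
    let mid := PySem.Int.floordiv (lo + hi) 2
    if k < bConsumed pref s n mid then bSearch pref s n k lo mid
    else bSearch pref s n k (mid + 1) hi
  else lo
termination_by (hi - lo).toNat
decreasing_by
  · have hb := PySem.Int.floordiv_two_mid_bounds (le_of_lt h)
    have hm : PySem.Int.floordiv (lo + hi) 2 = (lo + hi) / 2 :=
      PySem.Int.floordiv_eq_ediv_of_pos (by omega)
    rw [hm] at hb ⊢; omega
  · have hb := PySem.Int.floordiv_two_mid_bounds (le_of_lt h)
    have hm : PySem.Int.floordiv (lo + hi) 2 = (lo + hi) / 2 :=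
      PySem.Int.floordiv_eq_ediv_of_pos (by omega)
    rw [hm] at hb ⊢; omega

def solution_alt (food_times : List Int) (k : Int) : Int :=
  let n : Int := food_times.length
  let s := PySem.List.sorted food_times (fun x => x) false
  let pref := bPrefLoop s [0] 0
  let lo := bSearch pref s n k 1 (n + 1)
  if lo = n + 1 then -1
  else
    let value := PySem.List.pyGetD s (lo - 1) 0
    let cnt := PySem.Int.mod (k - bConsumed pref s n (lo - 1)) (n - lo + 1)
    -- "[i for i, t in enumerate(food_times, 1) if t >= value][cnt]"
    let survivors := ((PySem.List.enumerate food_times 1).filter (fun p => decide (value ≤ p.2))).map Prod.fst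
    PySem.List.pyGetD survivors cnt 0

-- ===== PRECONDITION & SPEC =====
def Spec_solution (food_times : List Int) (k : Int) (out : Int) : Prop := out = solution_alt food_times k
instance (food_times : List Int) (k : Int) (out : Int) : Decidable (Spec_solution food_times k out) := by unfold Spec_solution; infer_instance

-- ===== CLAIM (what is proved, stated in full; the proofs are below) =====
def Claim_equal_solution : Prop := ∀ (food_times : List Int) (k : Int), Dom_solution food_times k → Spec_solution food_times k (solution food_times k)

-- ===== LEMMAS AND PROOFS =====

-- sorted(food_times)
def pvS (ft : List Int) : List Int := PySem.List.sorted ft (fun x => x) false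

theorem pvS_length (ft : List Int) : (pvS ft).length = ft.length := by
  simp [pvS, PySem.List.length_sorted]

-- total seconds consumed when level i (1-based position in the sorted list) finishes
def pvC (s : List Int) (i : Nat) : Int :=
  if i = 0 then 0
  else (s.take (i - 1)).sum + s.getD (i - 1) 0 * ((s.length : Int) - i + 1)

-- first index in [j, j+fuel) satisfying P, else j+fuel
def pvFirst (P : Nat → Prop) [DecidablePred P] : Nat → Nat → Nat
  | 0, j => j
  | fuel + 1, j => if P j then j else pvFirst P fuel (j + 1)

theorem pvS_getD_mono (ft : List Int) (p q : Nat) (hpq : p ≤ q) (hq : q < ft.length) :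
    (pvS ft).getD p 0 ≤ (pvS ft).getD q 0 := by
  have hq' : q < (pvS ft).length := by rw [pvS_length]; exact hq
  have hp' : p < (pvS ft).length := lt_of_le_of_lt hpq hq'
  rw [List.getD_eq_getElem _ _ hp', List.getD_eq_getElem _ _ hq']
  have := PySem.List.key_sorted_getElem_mono (xs := ft)
    (key := fun x : Int => x) (p := p) (q := q) hpq (by simpa [pvS] using hq')
  simpa [pvS] using this

theorem pv_take_sum_succ (s : List Int) (m : Nat) (hm : m < s.length) :
    (s.take (m + 1)).sum = (s.take m).sum + s.getD m 0 := by
  rw [List.take_add_one, List.sum_append, List.getD_eq_getElem _ _ hm]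
  simp [List.getElem?_eq_getElem hm]

-- the increment of pvC is exactly A's remove_time at step j
theorem pvC_step (s : List Int) (j : Nat) (h1 : 1 ≤ j) (h2 : j ≤ s.length) :
    pvC s j - pvC s (j - 1)
      = (s.getD (j - 1) 0 - (0 :: s).getD (j - 1) 0) * ((s.length : Int) - j + 1) := by
  rcases Nat.lt_or_ge j 2 with hj2 | hj2
  · have hj1 : j = 1 := by omega
    subst hj1
    simp [pvC]
  · have e1 : j - 1 = (j - 2) + 1 := by omega
    have e2 : j - 1 - 1 = j - 2 := by omega
    have hm : j - 2 < s.length := by omega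
    unfold pvC
    rw [if_neg (by omega), if_neg (by omega), e2, e1,
        pv_take_sum_succ s (j - 2) hm, List.getD_cons_succ]
    have c1 : (((j - 2 + 1 : Nat) : Int)) = (j : Int) - 1 := by omega
    rw [c1]
    ring

theorem pvC_mono_step (ft : List Int) (j : Nat) (h1 : 1 ≤ j) (h2 : j + 1 ≤ ft.length) :
    pvC (pvS ft) j ≤ pvC (pvS ft) (j + 1) := by
  have hstep := pvC_step (pvS ft) (j + 1) (by omega) (by rw [pvS_length]; omega)
  have e1 : j + 1 - 1 = j := by omega
  rw [e1] at hstep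
  have hcons : ((0 : Int) :: pvS ft).getD j 0 = (pvS ft).getD (j - 1) 0 := by
    obtain ⟨m, rfl⟩ : ∃ m, j = m + 1 := ⟨j - 1, by omega⟩
    simp
  have hmono : (pvS ft).getD (j - 1) 0 ≤ (pvS ft).getD j 0 :=
    pvS_getD_mono ft (j - 1) j (by omega) (by omega)
  have hfac : (0 : Int) ≤ ((pvS ft).length : Int) - (j + 1 : Nat) + 1 := by
    rw [pvS_length]; omega
  nlinarith [hstep, hcons, hmono, hfac]

theorem pvC_mono (ft : List Int) (i j : Nat) (h1 : 1 ≤ i) (hij : i ≤ j) (hj : j ≤ ft.length) :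
    pvC (pvS ft) i ≤ pvC (pvS ft) j := by
  obtain ⟨d, rfl⟩ := Nat.exists_eq_add_of_le hij
  clear hij
  induction d with
  | zero => simp
  | succ d ih =>
    have e : i + (d + 1) = (i + d) + 1 := by omega
    rw [e]
    exact le_trans (ih (by omega)) (pvC_mono_step ft (i + d) (by omega) (by omega))

-- prefix sums as a list, for characterising bPrefLoop
def pvSums (acc : Int) : List Int → List Int
  | [] => []
  | t :: rest => (acc + t) :: pvSums (acc + t) rest

theorem bPrefLoop_eq (l : List Int) : ∀ (pref : List Int) (acc : Int),
    bPrefLoop l pref acc = pref ++ pvSums acc l := by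
  induction l with
  | nil => intro pref acc; simp [bPrefLoop, pvSums]
  | cons t rest ih =>
    intro pref acc
    rw [bPrefLoop.eq_def]
    simp only [pvSums, ih]
    simp

theorem pvSums_getD (l : List Int) : ∀ (acc : Int) (j : Nat), j < l.length →
    (pvSums acc l).getD j 0 = acc + (l.take (j + 1)).sum := by
  induction l with
  | nil => intro acc j h; simp at h
  | cons t rest ih =>
    intro acc j h
    cases j with
    | zero => simp [pvSums]
    | succ m =>
      simp only [pvSums, List.getD_cons_succ]
      rw [ih (acc + t) m (by simpa using Nat.lt_of_succ_lt_succ h), List.take_succ_cons]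
      simp
      ring

-- the pref list built by B's loop holds the prefix sums
theorem bPrefLoop_spec (ft : List Int) (j : Nat) (hj : j ≤ ft.length) :
    (bPrefLoop (pvS ft) [0] 0).getD j 0 = ((pvS ft).take j).sum := by
  rw [bPrefLoop_eq]
  cases j with
  | zero => simp
  | succ m =>
    have hm : m < (pvS ft).length := by rw [pvS_length]; omega
    have : ([(0 : Int)] ++ pvSums 0 (pvS ft)).getD (m + 1) 0
        = (pvSums 0 (pvS ft)).getD m 0 := by simp
    rw [this, pvSums_getD (pvS ft) 0 m hm]
    simp

-- B's consumed(i) = pvC at Nat arguments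
theorem bConsumed_eq (ft : List Int) (i : Nat) (hi : i ≤ ft.length) :
    bConsumed (bPrefLoop (pvS ft) [0] 0) (pvS ft) (ft.length : Int) (i : Int)
      = pvC (pvS ft) i := by
  cases i with
  | zero => simp [bConsumed, pvC]
  | succ m =>
    unfold bConsumed pvC
    rw [if_neg (by omega), if_neg (by omega)]
    have c1 : ((m + 1 : Nat) : Int) - 1 = ((m : Nat) : Int) := by push_cast; ring
    rw [c1, PySem.List.pyGetD_natCast, PySem.List.pyGetD_natCast,
        bPrefLoop_spec ft m (by omega)]
    have e : m + 1 - 1 = m := rfl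
    rw [e, pvS_length]

-- pvFirst utilities
theorem pvFirst_bounds (P : Nat → Prop) [DecidablePred P] (fuel j : Nat) :
    j ≤ pvFirst P fuel j ∧ pvFirst P fuel j ≤ j + fuel := by
  induction fuel generalizing j with
  | zero => simp [pvFirst]
  | succ f ih =>
    simp only [pvFirst]
    split
    · omega
    · have := ih (j + 1); omega

theorem pvFirst_of_P (P : Nat → Prop) [DecidablePred P] (fuel j : Nat) (h : P j) :
    pvFirst P fuel j = j := by
  cases fuel <;> simp [pvFirst, h]

theorem pvFirst_cut (P : Nat → Prop) [DecidablePred P] (f g j : Nat) (h : P (j + f)) :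
    pvFirst P (f + g) j = pvFirst P f j := by
  induction f generalizing j with
  | zero => simpa [pvFirst] using pvFirst_of_P P g j (by simpa using h)
  | succ f ih =>
    have e : f + 1 + g = (f + g) + 1 := by omega
    rw [e]
    simp only [pvFirst]
    split
    · rfl
    · exact ih (j + 1) (by
        have e2 : j + 1 + f = j + (f + 1) := by omega
        rw [e2]; exact h)

theorem pvFirst_skip (P : Nat → Prop) [DecidablePred P] (d g j : Nat)
    (h : ∀ m, j ≤ m → m < j + d → ¬ P m) :
    pvFirst P (d + g) j = pvFirst P g (j + d) := by
  induction d generalizing j with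
  | zero => simp
  | succ d ih =>
    have e : d + 1 + g = (d + g) + 1 := by omega
    rw [e]
    simp only [pvFirst]
    rw [if_neg (h j (le_refl j) (by omega))]
    have := ih (j + 1) (fun m hm1 hm2 => h m (by omega) (by omega))
    rw [this]
    congr 1
    omega

-- B's binary search computes pvFirst of the predicate (k < pvC s ·) on [lo, hi)
theorem bSearch_eq_pvFirst (ft : List Int) (k : Int) :
    ∀ (fuel lo hi : Nat), hi - lo = fuel → 1 ≤ lo → hi ≤ ft.length + 1 →
    bSearch (bPrefLoop (pvS ft) [0] 0) (pvS ft) (ft.length : Int) k (lo : Int) (hi : Int)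
      = ((pvFirst (fun m => k < pvC (pvS ft) m) (hi - lo) lo : Nat) : Int) := by
  intro fuel
  induction fuel using Nat.strong_induction_on with
  | _ fuel ih =>
    intro lo hi hfuel hlo hhi
    rw [bSearch]
    by_cases hlh : lo < hi
    · rw [dif_pos (by exact_mod_cast hlh)]
      have hcast : (lo : Int) + (hi : Int) = ((lo + hi : Nat) : Int) := by push_cast; ring
      have hmid : PySem.Int.floordiv ((lo : Int) + (hi : Int)) 2 = (((lo + hi) / 2 : Nat) : Int) := by
        rw [hcast]; exact_mod_cast PySem.Int.floordiv_natCast (lo + hi) 2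
      set midn : Nat := (lo + hi) / 2 with hmidn
      have hb1 : lo ≤ midn := by omega
      have hb2 : midn < hi := by omega
      have hc : bConsumed (bPrefLoop (pvS ft) [0] 0) (pvS ft) (ft.length : Int) ((midn : Nat) : Int)
          = pvC (pvS ft) midn := bConsumed_eq ft midn (by omega)
      simp only [hmid, hc]
      by_cases hk : k < pvC (pvS ft) midn
      · rw [if_pos hk]
        rw [ih (midn - lo) (by omega) lo midn rfl hlo (by omega)]
        have e : hi - lo = (midn - lo) + (hi - midn) := by omega
        rw [e, pvFirst_cut (fun m => k < pvC (pvS ft) m) (midn - lo) (hi - midn) lo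
              (by have : lo + (midn - lo) = midn := by omega
                  rw [this]; exact hk)]
      · rw [if_neg hk]
        have hnone : ∀ m, lo ≤ m → m < lo + (midn + 1 - lo) → ¬ k < pvC (pvS ft) m := by
          intro m hm1 hm2 hPm
          exact hk (lt_of_lt_of_le hPm (pvC_mono ft m midn (by omega) (by omega) (by omega)))
        have e : hi - lo = (midn + 1 - lo) + (hi - (midn + 1)) := by omega
        rw [e, pvFirst_skip (fun m => k < pvC (pvS ft) m) (midn + 1 - lo) (hi - (midn + 1)) lo hnone]
        have e2 : lo + (midn + 1 - lo) = midn + 1 := by omega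
        rw [e2]
        have e3 : ((midn : Nat) : Int) + 1 = ((midn + 1 : Nat) : Int) := by push_cast; ring
        rw [e3, ih (hi - (midn + 1)) (by omega) (midn + 1) hi rfl (by omega) hhi]
    · rw [dif_neg (by exact_mod_cast hlh)]
      have e : hi - lo = 0 := by omega
      rw [e]
      rfl

-- A's first loop dispatches on the same pvFirst
theorem aLoop_eq_pvFirst (ft : List Int) (k : Int) :
    ∀ (fuel j : Nat), 1 ≤ j → j + fuel = ft.length + 1 →
    aLoop (0 :: pvS ft) (PySem.List.pyRange (j : Int) ((ft.length : Int) + 1) 1)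
        (k - pvC (pvS ft) (j - 1)) ((ft.length : Int) - ((j : Int) - 1))
      = (let r := pvFirst (fun m => k < pvC (pvS ft) m) fuel j
         if r ≤ ft.length then some ((r : Int), k - pvC (pvS ft) (r - 1)) else none) := by
  intro fuel
  induction fuel with
  | zero =>
    intro j hj1 hj2
    rw [PySem.List.pyRange_one_eq_nil (by exact_mod_cast (by omega : (ft.length + 1 : Nat) ≤ j))]
    simp only [pvFirst]
    rw [if_neg (by omega)]
    rfl
  | succ fuel ih =>
    intro j hj1 hj2
    have hjle : j ≤ ft.length := by omega
    rw [PySem.List.pyRange_one_cons (by exact_mod_cast (by omega : j < ft.length + 1))]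
    simp only [aLoop]
    have hg1 : PySem.List.pyGetD ((0 : Int) :: pvS ft) ((j : Nat) : Int) 0
        = (pvS ft).getD (j - 1) 0 := by
      rw [PySem.List.pyGetD_natCast]
      obtain ⟨m, rfl⟩ : ∃ m, j = m + 1 := ⟨j - 1, by omega⟩
      simp
    have hg0 : PySem.List.pyGetD ((0 : Int) :: pvS ft) (((j : Nat) : Int) - 1) 0
        = ((0 : Int) :: pvS ft).getD (j - 1) 0 := by
      have c : ((j : Nat) : Int) - 1 = ((j - 1 : Nat) : Int) := by omega
      rw [c, PySem.List.pyGetD_natCast]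
    have hstep := pvC_step (pvS ft) j hj1 (by rw [pvS_length]; exact hjle)
    rw [pvS_length] at hstep
    have hrem : (PySem.List.pyGetD ((0 : Int) :: pvS ft) ((j : Nat) : Int) 0
          - PySem.List.pyGetD ((0 : Int) :: pvS ft) (((j : Nat) : Int) - 1) 0)
          * ((ft.length : Int) - ((j : Int) - 1))
        = pvC (pvS ft) j - pvC (pvS ft) (j - 1) := by
      rw [hg1, hg0, hstep]
      ring_nf
    rw [hrem]
    by_cases hP : k < pvC (pvS ft) j
    · rw [if_pos (by omega)]
      simp only [pvFirst]
      rw [if_pos hP, if_pos hjle]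
    · rw [if_neg (by omega)]
      have harg : k - pvC (pvS ft) (j - 1) - (pvC (pvS ft) j - pvC (pvS ft) (j - 1))
          = k - pvC (pvS ft) ((j + 1) - 1) := by
        have e : (j + 1) - 1 = j := rfl
        rw [e]; ring
      have hlen : (ft.length : Int) - ((j : Int) - 1) - 1
          = (ft.length : Int) - (((j + 1 : Nat) : Int) - 1) := by push_cast; ring
      have hcast : ((j : Nat) : Int) + 1 = ((j + 1 : Nat) : Int) := by push_cast; ring
      rw [harg, hlen, hcast, ih (j + 1) (by omega) (by omega)]
      simp only [pvFirst]
      rw [if_neg hP]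

-- A's cnt-countdown scan picks the cnt-th element of the filter
theorem pv_aScan_eq (value : Int) : ∀ (l : List (Int × Int)) (cnt : Int), 0 ≤ cnt →
    cnt.toNat < (l.filter (fun p => decide (value ≤ p.2))).length →
    aScan value l cnt = ((l.filter (fun p => decide (value ≤ p.2))).getD cnt.toNat (0, 0)).1 + 1 := by
  intro l
  induction l with
  | nil => intro cnt h0 h; simp at h
  | cons p rest ih =>
    intro cnt h0 h
    rcases p with ⟨i, t⟩
    by_cases hvt : value ≤ t
    · have hf : ((i, t) :: rest).filter (fun p => decide (value ≤ p.2))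
          = (i, t) :: rest.filter (fun p => decide (value ≤ p.2)) := by
        simp [hvt]
      rw [hf] at h ⊢
      by_cases hz : cnt = 0
      · subst hz
        simp [aScan, hvt]
      · have h1 : cnt.toNat = (cnt - 1).toNat + 1 := by omega
        have h2 : (cnt - 1).toNat < (rest.filter (fun p => decide (value ≤ p.2))).length := by
          simp at h; omega
        simp only [aScan, if_pos hvt, if_neg hz]
        rw [ih (cnt - 1) (by omega) h2, h1, List.getD_cons_succ]
    · have hf : ((i, t) :: rest).filter (fun p => decide (value ≤ p.2))
          = rest.filter (fun p => decide (value ≤ p.2)) := by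
        simp [hvt]
      rw [hf] at h ⊢
      simp only [aScan, if_neg hvt]
      exact ih cnt h0 h

theorem pv_enumerate_shift {α : Type} (xs : List α) : ∀ (s : Int),
    PySem.List.enumerate xs (s + 1) = (PySem.List.enumerate xs s).map (fun p => (p.1 + 1, p.2)) := by
  induction xs with
  | nil => intro s; simp [PySem.List.enumerate_nil]
  | cons x xs ih => intro s; simp [PySem.List.enumerate_cons, ih (s + 1)]

-- enough dishes survive: at least n - r + 1 entries of ft are ≥ the r-th sorted value
theorem pv_filter_len (ft : List Int) (r : Nat) (h1 : 1 ≤ r) (h2 : r ≤ ft.length) :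
    ft.length - r + 1 ≤ (ft.filter (fun t => decide ((pvS ft).getD (r - 1) 0 ≤ t))).length := by
  have hperm : ((pvS ft).filter (fun t => decide ((pvS ft).getD (r - 1) 0 ≤ t))).Perm
      (ft.filter (fun t => decide ((pvS ft).getD (r - 1) 0 ≤ t))) :=
    (PySem.List.sorted_perm ft (fun x => x) false).filter _
  rw [← hperm.length_eq]
  set p : Int → Bool := fun t => decide ((pvS ft).getD (r - 1) 0 ≤ t) with hp
  have hdrop : ((pvS ft).drop (r - 1)).filter p = (pvS ft).drop (r - 1) := by
    rw [List.filter_eq_self]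
    intro x hx
    obtain ⟨m, hm, hpm⟩ := List.getElem_of_mem hx
    rw [List.length_drop, pvS_length] at hm
    have hmono := pvS_getD_mono ft (r - 1) ((r - 1) + m) (by omega) (by omega)
    rw [List.getD_eq_getElem _ _ (show (r - 1) + m < (pvS ft).length by rw [pvS_length]; omega)]
      at hmono
    simp only [List.getElem_drop] at hpm
    rw [hpm] at hmono
    simpa [hp] using hmono
  have hsplit : (pvS ft).filter p = ((pvS ft).take (r - 1)).filter p ++ (pvS ft).drop (r - 1) := by
    conv_lhs => rw [← List.take_append_drop (r - 1) (pvS ft)]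
    rw [List.filter_append, hdrop]
  rw [hsplit, List.length_append, List.length_drop, pvS_length]
  omega

theorem pv_getD_cons_pred (x : Int) (l : List Int) (j : Nat) (h : 1 ≤ j) :
    (x :: l).getD j 0 = l.getD (j - 1) 0 := by
  obtain ⟨m, rfl⟩ : ∃ m, j = m + 1 := ⟨j - 1, by omega⟩
  simp

theorem solution_main (ft : List Int) (k : Int) :
    solution ft k = solution_alt ft k := by
  have hA := aLoop_eq_pvFirst ft k ft.length 1 (by omega) (by omega)
  have hB := bSearch_eq_pvFirst ft k ft.length 1 (ft.length + 1) (by omega) (by omega)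
    (by omega)
  simp only [Nat.add_sub_cancel] at hB
  simp only [show pvC (pvS ft) (1 - 1) = 0 from rfl, Nat.cast_one, sub_self, sub_zero] at hA
  set r := pvFirst (fun m => k < pvC (pvS ft) m) ft.length 1 with hrdef
  have hbnd := pvFirst_bounds (fun m => k < pvC (pvS ft) m) ft.length 1
  rw [← hrdef] at hbnd
  simp only [solution, solution_alt,
    show PySem.List.sorted ft (fun x => x) false = pvS ft from rfl]
  rw [show ((1 : Nat) : Int) = (1 : Int) from rfl, show (((ft.length + 1 : Nat)) : Int) = (ft.length : Int) + 1 from by omega] at hB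
  by_cases hrle : r ≤ ft.length
  · rw [if_pos hrle] at hA
    simp only [hA, hB]
    rw [if_neg (by omega)]
    -- value on both sides is the (r-1)-th sorted time
    have hg1 : PySem.List.pyGetD ((0 : Int) :: pvS ft) ((r : Nat) : Int) 0
        = (pvS ft).getD (r - 1) 0 := by
      rw [PySem.List.pyGetD_natCast, pv_getD_cons_pred 0 (pvS ft) r (by omega)]
    have hg2 : PySem.List.pyGetD (pvS ft) (((r : Nat) : Int) - 1) 0
        = (pvS ft).getD (r - 1) 0 := by
      have c : ((r : Nat) : Int) - 1 = ((r - 1 : Nat) : Int) := by omega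
      rw [c, PySem.List.pyGetD_natCast]
    have hcons : bConsumed (bPrefLoop (pvS ft) [0] 0) (pvS ft) (ft.length : Int)
        (((r : Nat) : Int) - 1) = pvC (pvS ft) (r - 1) := by
      have c : ((r : Nat) : Int) - 1 = ((r - 1 : Nat) : Int) := by omega
      rw [c, bConsumed_eq ft (r - 1) (by omega)]
    rw [hg1, hg2, hcons]
    set v := (pvS ft).getD (r - 1) 0 with hv
    set cnt := PySem.Int.mod (k - pvC (pvS ft) (r - 1)) ((ft.length : Int) - (r : Int) + 1)
      with hcnt
    have hm0 : (0 : Int) < (ft.length : Int) - (r : Int) + 1 := by omega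
    have hcnt0 : 0 ≤ cnt := PySem.Int.mod_nonneg _ hm0
    have hcntm : cnt < (ft.length : Int) - (r : Int) + 1 := PySem.Int.mod_lt _ hm0
    -- the filtered enumeration has the same length as the filtered list
    have hflen : (ft.filter (fun t => decide (v ≤ t))).length
        = ((PySem.List.enumerate ft 0).filter (fun p => decide (v ≤ p.2))).length := by
      conv_lhs => rw [← PySem.List.map_snd_enumerate ft 0]
      rw [List.filter_map, List.length_map]
      rfl
    have hlong := pv_filter_len ft r (by omega) hrle
    rw [← hv] at hlong
    have hidx : cnt.toNat
        < ((PySem.List.enumerate ft 0).filter (fun p => decide (v ≤ p.2))).length := by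
      rw [← hflen]; omega
    rw [pv_aScan_eq v (PySem.List.enumerate ft 0) cnt hcnt0 hidx]
    -- B's survivors list is the same filter shifted to 1-based indices
    have hshift : PySem.List.enumerate ft 1
        = (PySem.List.enumerate ft 0).map (fun p => (p.1 + 1, p.2)) := by
      have := pv_enumerate_shift ft 0
      norm_num at this
      exact this
    have hcomp : ((fun p : Int × Int => decide (v ≤ p.2)) ∘ (fun p : Int × Int => (p.1 + 1, p.2)))
        = (fun p : Int × Int => decide (v ≤ p.2)) := rfl
    rw [hshift, List.filter_map, hcomp, List.map_map]
    have hcast : cnt = ((cnt.toNat : Nat) : Int) := by omega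
    rw [hcast, PySem.List.pyGetD_natCast]
    simp only [Int.toNat_natCast]
    conv_lhs => rw [List.getD_eq_getElem _ _ hidx]
    conv_rhs => rw [List.getD_eq_getElem _ _ (show cnt.toNat <
      ((List.filter (fun p => decide (v ≤ p.2)) (PySem.List.enumerate ft 0)).map
        (Prod.fst ∘ fun p : Int × Int => (p.1 + 1, p.2))).length by
          rw [List.length_map]; exact hidx), List.getElem_map]
    rfl
  · have hreq : r = ft.length + 1 := by omega
    rw [if_neg hrle] at hA
    simp only [hA, hB]
    rw [if_pos (by rw [hreq]; push_cast; ring)]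

-- ===== VERDICT (by name: the statement is the Claim_ definition above) =====
theorem solution_spec : Claim_equal_solution := by
  intro ft k _
  unfold Spec_solution
  exact solution_main ft k
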